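-- pv_equiv track=rewrite | github.com/Dominexis/Collatz-Conjecture | generic.py | convert_powers_to_steps
-- ===== SOURCE A (Python) =====
-- def convert_powers_to_steps(powers: list[int]) -> str:
--     """
--     Converts a sequence of powers of 2 to a steps string consisting of up and down steps (denoted by "u" and "d").
--     """
--
--     steps = ""
--     for power in powers:
--         steps += "u"
--         while True:
--             power //= 2
--             if power <= 1:
--                 break
--             steps += "d"
--
--     return steps
-- ===== SOURCE B (Python) =====
-- def convert_powers_to_steps(powers: list[int]) -> str:
--     """Same result as A: one "u" per power followed by bit_length(power)-2 "d"s (0 for power <= 1)."""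
--     return "".join(
--         "u" + "d" * (power.bit_length() - 2 if power > 1 else 0)
--         for power in powers
--     )
-- ===== Notes on version B (the rewrite author's own statement) =====
-- stated objective: idiomatic
-- what changed: Replaces the repeated-halving inner while loop and incremental string concatenation with a closed-form bit_length count per element and one ''.join over a generator.
import Mathlib
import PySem

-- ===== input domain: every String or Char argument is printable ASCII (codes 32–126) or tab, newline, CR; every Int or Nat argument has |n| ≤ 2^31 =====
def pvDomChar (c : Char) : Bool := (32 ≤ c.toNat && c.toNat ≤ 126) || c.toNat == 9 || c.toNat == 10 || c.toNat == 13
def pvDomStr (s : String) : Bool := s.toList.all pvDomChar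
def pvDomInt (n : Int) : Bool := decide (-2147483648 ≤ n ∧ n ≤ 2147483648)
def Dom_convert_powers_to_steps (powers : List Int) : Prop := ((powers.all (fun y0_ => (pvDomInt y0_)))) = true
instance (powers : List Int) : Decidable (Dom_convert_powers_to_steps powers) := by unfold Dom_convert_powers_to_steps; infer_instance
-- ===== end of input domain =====

-- B replaces A's inner halving while-loop by a closed-form bit_length count and one join (idiomatic).

-- ===== PORT A =====
-- inner 'while True: power //= 2; if power <= 1: break; steps += "d"' loop of A
def pvDloop (power : Int) : String :=
  let p := PySem.Int.floordiv power 2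
  if h : p ≤ 1 then ""
  else "d" ++ pvDloop p
termination_by power.toNat
decreasing_by
  have h2 : PySem.Int.floordiv power 2 = power / 2 :=
    PySem.Int.floordiv_eq_ediv_of_pos (by omega)
  simp only [h2] at h ⊢
  omega

def convert_powers_to_steps (powers : List Int) : String :=
  powers.foldl (fun steps power => (steps ++ "u") ++ pvDloop power) ""

-- ===== PORT B =====
-- power.bit_length() is ported as PySem.Int.bitLength; "d" * n as String.ofList (List.replicate n 'd')
def convert_powers_to_steps_alt (powers : List Int) : String :=
  String.join (powers.map (fun power =>
    "u" ++ String.ofList (List.replicate (if 1 < power then PySem.Int.bitLength power - 2 else 0) 'd')))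

-- ===== PRECONDITION & SPEC =====
def Spec_convert_powers_to_steps (powers : List Int) (out : String) : Prop := out = convert_powers_to_steps_alt powers
instance (powers : List Int) (out : String) : Decidable (Spec_convert_powers_to_steps powers out) := by unfold Spec_convert_powers_to_steps; infer_instance

-- ===== CLAIM (what is proved, stated in full; the proofs are below) =====
def Claim_equal_convert_powers_to_steps : Prop := ∀ (powers : List Int), Dom_convert_powers_to_steps powers → Spec_convert_powers_to_steps powers (convert_powers_to_steps powers)

-- ===== LEMMAS AND PROOFS =====

theorem pvTwo_le_bitLength {n : Int} (h : 2 ≤ n) : 2 ≤ PySem.Int.bitLength n := by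
  by_contra hlt
  have hlt2 := PySem.Int.lt_two_pow_bitLength n
  have : n.natAbs < 2 ^ 1 :=
    lt_of_lt_of_le hlt2 (Nat.pow_le_pow_right (by norm_num) (by omega))
  omega

theorem pvDloop_eq (power : Int) :
    pvDloop power =
      String.ofList (List.replicate (if 1 < power then PySem.Int.bitLength power - 2 else 0) 'd') := by
  rw [pvDloop]
  have h2 : PySem.Int.floordiv power 2 = power / 2 :=
    PySem.Int.floordiv_eq_ediv_of_pos (by omega)
  by_cases h : PySem.Int.floordiv power 2 ≤ 1
  · simp only [h, dif_pos]
    rw [h2] at h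
    by_cases hp : 1 < power
    · have : power = 2 ∨ power = 3 := by omega
      rcases this with rfl | rfl <;> decide
    · simp [hp]
  · simp only [h, dif_neg, not_false_iff]
    have hp' : 2 ≤ PySem.Int.floordiv power 2 := by omega
    have hp4 : 4 ≤ power := by rw [h2] at hp'; omega
    rw [pvDloop_eq (PySem.Int.floordiv power 2)]
    have hbl : PySem.Int.bitLength power = PySem.Int.bitLength (PySem.Int.floordiv power 2) + 1 :=
      PySem.Int.bitLength_of_pos (by omega)
    have hb2 : 2 ≤ PySem.Int.bitLength (PySem.Int.floordiv power 2) := pvTwo_le_bitLength hp'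
    simp only [hbl, if_pos (show (1:Int) < power by omega), if_pos (show (1:Int) < PySem.Int.floordiv power 2 by omega)]
    have : PySem.Int.bitLength (PySem.Int.floordiv power 2) + 1 - 2 =
        (PySem.Int.bitLength (PySem.Int.floordiv power 2) - 2) + 1 := by omega
    rw [this, List.replicate_succ,
      show ('d' :: List.replicate (PySem.Int.bitLength (PySem.Int.floordiv power 2) - 2) 'd') =
        ['d'] ++ List.replicate (PySem.Int.bitLength (PySem.Int.floordiv power 2) - 2) 'd' from rfl,
      ← String.ofList_append]
termination_by power.toNat
decreasing_by
  simp only [h2] at h ⊢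
  omega

theorem pvFoldl_acc (xs : List String) (a : String) :
    xs.foldl (· ++ ·) a = a ++ xs.foldl (· ++ ·) "" := by
  induction xs generalizing a with
  | nil => simp
  | cons x t ih => simp only [List.foldl_cons]; rw [ih, ih ("" ++ x)]; simp [String.append_assoc]

theorem pvJoin_cons (x : String) (xs : List String) :
    String.join (x :: xs) = x ++ String.join xs := by
  simp only [String.join, List.foldl_cons]
  rw [pvFoldl_acc xs ("" ++ x)]
  simp

theorem pvFoldl_join (l : List Int) (s : String) :
    l.foldl (fun steps power => (steps ++ "u") ++ pvDloop power) s =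
      s ++ String.join (l.map (fun power =>
        "u" ++ String.ofList (List.replicate (if 1 < power then PySem.Int.bitLength power - 2 else 0) 'd'))) := by
  induction l generalizing s with
  | nil => simp [String.join]
  | cons p t ih =>
    simp only [List.foldl_cons, List.map_cons]
    rw [ih, pvJoin_cons, pvDloop_eq]
    simp [String.append_assoc]

-- ===== VERDICT (by name: the statement is the Claim_ definition above) =====
theorem convert_powers_to_steps_spec : Claim_equal_convert_powers_to_steps := by
  intro powers _
  unfold Spec_convert_powers_to_steps convert_powers_to_steps convert_powers_to_steps_alt
  rw [pvFoldl_join]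
  simp
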